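-- pv_equiv track=rewrite | github.com/matheuslins/cuzjobs | users_auth/views.py | set_level
-- ===== SOURCE A (Python) =====
-- def set_level(score_lang):
--     level_lang = {}
--     level = ''
--     for lang, score in score_lang.items():
--         if score <=200:
--             level = 'Iniciante'
--         elif score > 200 and score <= 400:
--             level = 'Júnior'
--         elif score > 400 and score <= 600:
--             level = 'Pleno'
--         elif score > 600 and score <= 800:
--             level = 'Sênior'
--         elif (score > 800 and score <= 1000) or (score > 1000):
--             level = 'Especialista'
--         level_lang.update({lang: level})
--     return level_lang
-- ===== SOURCE B (Python) =====
-- def set_level(score_lang):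
--     levels = ('Iniciante', 'J\u00fanior', 'Pleno', 'S\u00eanior', 'Especialista')
--     return {lang: levels[sum(score > b for b in (200, 400, 600, 800))]
--             for lang, score in score_lang.items()}
-- ===== Notes on version B (the rewrite author's own statement) =====
-- stated objective: simpler
-- what changed: Replaces the five-branch if/elif chain with its carried level variable by a dict comprehension that indexes a fixed level table with the count of thresholds the score exceeds.
import Mathlib
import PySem

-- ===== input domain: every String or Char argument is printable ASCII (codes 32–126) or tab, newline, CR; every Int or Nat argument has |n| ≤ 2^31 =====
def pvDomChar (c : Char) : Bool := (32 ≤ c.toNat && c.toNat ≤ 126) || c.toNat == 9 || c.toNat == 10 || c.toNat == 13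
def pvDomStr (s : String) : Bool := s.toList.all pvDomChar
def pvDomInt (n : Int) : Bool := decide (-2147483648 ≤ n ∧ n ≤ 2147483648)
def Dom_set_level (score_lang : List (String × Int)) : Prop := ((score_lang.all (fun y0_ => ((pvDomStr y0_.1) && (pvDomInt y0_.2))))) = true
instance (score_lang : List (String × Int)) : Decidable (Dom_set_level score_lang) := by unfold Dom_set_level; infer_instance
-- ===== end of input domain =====

-- B replaces A's if/elif chain and carried 'level' variable by indexing a level table with
-- the count of boundaries the score exceeds (simpler, same cost).

-- ===== PORT A =====
def set_level (score_lang : List (String × Int)) : List (String × String) :=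
  (score_lang.foldl
    (fun (st : PySem.Dict String String × String) p =>
      let level :=
        if p.2 ≤ 200 then "Iniciante"
        else if p.2 > 200 ∧ p.2 ≤ 400 then "Júnior"
        else if p.2 > 400 ∧ p.2 ≤ 600 then "Pleno"
        else if p.2 > 600 ∧ p.2 ≤ 800 then "Sênior"
        else if (p.2 > 800 ∧ p.2 ≤ 1000) ∨ p.2 > 1000 then "Especialista"
        else st.2
      (st.1.insert p.1 level, level))
    (PySem.Dict.empty, "")).1.items

-- ===== PORT B =====
def set_level_alt (score_lang : List (String × Int)) : List (String × String) :=
  (score_lang.foldl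
    (fun (d : PySem.Dict String String) p =>
      d.insert p.1
        (["Iniciante", "Júnior", "Pleno", "Sênior", "Especialista"].getD
          (([200, 400, 600, 800] : List Int).countP (fun b => p.2 > b)) ""))
    PySem.Dict.empty).items

-- ===== PRECONDITION & SPEC =====
def Spec_set_level (score_lang : List (String × Int)) (out : List (String × String)) : Prop := out = set_level_alt score_lang
instance (score_lang : List (String × Int)) (out : List (String × String)) : Decidable (Spec_set_level score_lang out) := by unfold Spec_set_level; infer_instance

-- ===== CLAIM (what is proved, stated in full; the proofs are below) =====
def Claim_equal_set_level : Prop := ∀ (score_lang : List (String × Int)), Dom_set_level score_lang → Spec_set_level score_lang (set_level score_lang)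

-- ===== LEMMAS AND PROOFS =====

-- per-score agreement: A's branch chain (with any carried level) equals B's table lookup
lemma level_eq (s : Int) (lvl : String) :
    (if s ≤ 200 then "Iniciante"
     else if s > 200 ∧ s ≤ 400 then "Júnior"
     else if s > 400 ∧ s ≤ 600 then "Pleno"
     else if s > 600 ∧ s ≤ 800 then "Sênior"
     else if (s > 800 ∧ s ≤ 1000) ∨ s > 1000 then "Especialista"
     else lvl) =
    ["Iniciante", "Júnior", "Pleno", "Sênior", "Especialista"].getD
      (([200, 400, 600, 800] : List Int).countP (fun b => s > b)) "" := by
  by_cases h1 : s ≤ 200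
  · simp [h1, show ¬(200:Int) < s from by omega, show ¬(400:Int) < s from by omega,
      show ¬(600:Int) < s from by omega, show ¬(800:Int) < s from by omega]
  by_cases h2 : s ≤ 400
  · simp [h1, h2, show (200:Int) < s from by omega, show ¬(400:Int) < s from by omega,
      show ¬(600:Int) < s from by omega, show ¬(800:Int) < s from by omega]
  by_cases h3 : s ≤ 600
  · simp [h1, h2, h3, show (200:Int) < s from by omega, show (400:Int) < s from by omega,
      show ¬(600:Int) < s from by omega, show ¬(800:Int) < s from by omega]
  by_cases h4 : s ≤ 800
  · simp [h1, h2, h3, h4, show (200:Int) < s from by omega, show (400:Int) < s from by omega,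
      show (600:Int) < s from by omega, show ¬(800:Int) < s from by omega]
  by_cases h5 : s ≤ 1000
  · simp [h1, h2, h3, h4, h5, show (200:Int) < s from by omega, show (400:Int) < s from by omega,
      show (600:Int) < s from by omega, show (800:Int) < s from by omega]
  · simp [h1, h2, h3, h4, h5, show (200:Int) < s from by omega, show (400:Int) < s from by omega,
      show (600:Int) < s from by omega, show (800:Int) < s from by omega, show (1000:Int) < s from by omega]

-- the two folds produce the same dict, for any start dict and any carried level
lemma fold_eq (l : List (String × Int)) (d : PySem.Dict String String) (lvl : String) :
    (l.foldl
      (fun (st : PySem.Dict String String × String) p =>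
        let level :=
          if p.2 ≤ 200 then "Iniciante"
          else if p.2 > 200 ∧ p.2 ≤ 400 then "Júnior"
          else if p.2 > 400 ∧ p.2 ≤ 600 then "Pleno"
          else if p.2 > 600 ∧ p.2 ≤ 800 then "Sênior"
          else if (p.2 > 800 ∧ p.2 ≤ 1000) ∨ p.2 > 1000 then "Especialista"
          else st.2
        (st.1.insert p.1 level, level)) (d, lvl)).1 =
    l.foldl
      (fun (d : PySem.Dict String String) p =>
        d.insert p.1
          (["Iniciante", "Júnior", "Pleno", "Sênior", "Especialista"].getD
            (([200, 400, 600, 800] : List Int).countP (fun b => p.2 > b)) "")) d := by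
  induction l generalizing d lvl with
  | nil => rfl
  | cons p t ih =>
    simp only [List.foldl_cons]
    rw [show (if p.2 ≤ 200 then "Iniciante"
          else if p.2 > 200 ∧ p.2 ≤ 400 then "Júnior"
          else if p.2 > 400 ∧ p.2 ≤ 600 then "Pleno"
          else if p.2 > 600 ∧ p.2 ≤ 800 then "Sênior"
          else if (p.2 > 800 ∧ p.2 ≤ 1000) ∨ p.2 > 1000 then "Especialista"
          else lvl) = _ from level_eq p.2 lvl]
    exact ih _ _

-- ===== VERDICT (by name: the statement is the Claim_ definition above) =====
theorem set_level_spec : Claim_equal_set_level := by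
  intro score_lang _
  unfold Spec_set_level set_level set_level_alt
  rw [fold_eq]
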